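-- pv_equiv track=rewrite | github.com/carolineSilva24/trabalho_1B_automatos | util.py | afn_checker
-- ===== SOURCE A (Python) =====
-- def afn_checker(lista_transicao, lista_estados):
--     count = 0
--     for elemento in lista_transicao:
--         if "h" == elemento[2]:
--             return True
--     for estado in lista_estados:
--         for elemento in lista_transicao:
--             if estado == elemento[0] and elemento[2] != "h":
--                 count += 1
--         if count < 2 or count > 2:
--             return True
--         else:
--             count = 0
--     return False
-- ===== SOURCE B (Python) =====
-- def afn_checker(lista_transicao, lista_estados):
--     # One pass to spot an epsilon ("h") transition, one pass to count
--     # transitions per source state into a dict, then check each state's count.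
--     if any(t[2] == "h" for t in lista_transicao):
--         return True
--     counts = {}
--     for t in lista_transicao:
--         counts[t[0]] = counts.get(t[0], 0) + 1
--     return any(counts.get(s, 0) != 2 for s in lista_estados)
-- ===== Notes on version B (the rewrite author's own statement) =====
-- stated objective: alternative
-- what changed: Replaces the nested state-by-state rescan of the transition list with a single pass that tallies transitions per source state into a dict, then checks each state's tally.
import Mathlib
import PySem

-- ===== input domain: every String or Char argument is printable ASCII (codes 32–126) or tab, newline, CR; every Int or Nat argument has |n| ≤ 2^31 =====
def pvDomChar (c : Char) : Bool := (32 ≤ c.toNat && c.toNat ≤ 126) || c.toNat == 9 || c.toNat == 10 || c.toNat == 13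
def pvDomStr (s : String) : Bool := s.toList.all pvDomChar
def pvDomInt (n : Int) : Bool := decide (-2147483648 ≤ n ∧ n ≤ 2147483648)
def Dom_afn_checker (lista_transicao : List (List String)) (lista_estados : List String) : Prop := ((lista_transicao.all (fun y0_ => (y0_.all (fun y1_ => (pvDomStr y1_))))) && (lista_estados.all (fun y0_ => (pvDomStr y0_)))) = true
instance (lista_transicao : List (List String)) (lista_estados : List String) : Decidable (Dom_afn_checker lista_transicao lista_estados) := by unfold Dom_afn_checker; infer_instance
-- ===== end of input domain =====

-- ===== PORT A =====
-- B changes A's nested per-state rescan into one counting pass over the transitions (objective: alternative).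
-- first loop of A: return True on the first transition whose third symbol is "h"
def afnLoop1 : List (List String) → Bool
  | [] => false
  | e :: rest =>
      if "h" = PySem.List.pyGetD e 2 "" then true else afnLoop1 rest

-- second loop of A: for each state count matching transitions, return True unless the count is exactly 2
def afnLoop2 (lista_transicao : List (List String)) : List String → Int → Bool
  | [], _ => false
  | estado :: rest, count =>
      let c := lista_transicao.foldl
        (fun c e =>
          if estado = PySem.List.pyGetD e 0 "" ∧ PySem.List.pyGetD e 2 "" ≠ "h" then c + 1 else c)
        count
      if c < 2 ∨ c > 2 then true else afnLoop2 lista_transicao rest 0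

def afn_checker (lista_transicao : List (List String)) (lista_estados : List String) : Bool :=
  if afnLoop1 lista_transicao then true
  else afnLoop2 lista_transicao lista_estados 0

-- ===== PORT B =====
def afn_checker_alt (lista_transicao : List (List String)) (lista_estados : List String) : Bool :=
  if lista_transicao.any (fun t => PySem.List.pyGetD t 2 "" == "h") then true
  else
    let counts := lista_transicao.foldl
      (fun d t => d.insert (PySem.List.pyGetD t 0 "") (d.getD (PySem.List.pyGetD t 0 "") 0 + 1))
      (PySem.Dict.empty : PySem.Dict String Int)
    lista_estados.any (fun s => counts.getD s 0 != 2)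

-- ===== PRECONDITION & SPEC =====
-- Pre_ excludes exactly the inputs on which A raises IndexError: a transition entry shorter
-- than 3 symbols that is reached before any "h"-transition short-circuits the scan.
def Pre_afn_checker (lista_transicao : List (List String)) (lista_estados : List String) : Prop :=
  ∀ i < lista_transicao.length, (lista_transicao.getD i []).length < 3 →
    ∃ j < i, (lista_transicao.getD j []).getD 2 "" = "h"
instance (lista_transicao : List (List String)) (lista_estados : List String) : Decidable (Pre_afn_checker lista_transicao lista_estados) := by unfold Pre_afn_checker; infer_instance
def pvWitness_afn_checker : List (List String) × List String :=
  ([["a", "0", "b"], ["a", "1", "b"]], ["a"])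

def Spec_afn_checker (lista_transicao : List (List String)) (lista_estados : List String) (out : Bool) : Prop := out = afn_checker_alt lista_transicao lista_estados
instance (lista_transicao : List (List String)) (lista_estados : List String) (out : Bool) : Decidable (Spec_afn_checker lista_transicao lista_estados out) := by unfold Spec_afn_checker; infer_instance

-- ===== CLAIM (what is proved, stated in full; the proofs are below) =====
def Claim_equal_afn_checker : Prop := ∀ (lista_transicao : List (List String)) (lista_estados : List String), Dom_afn_checker lista_transicao lista_estados → Pre_afn_checker lista_transicao lista_estados → Spec_afn_checker lista_transicao lista_estados (afn_checker lista_transicao lista_estados)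

-- ===== LEMMAS AND PROOFS =====
lemma afnLoop1_eq_any (lt : List (List String)) :
    afnLoop1 lt = lt.any (fun t => PySem.List.pyGetD t 2 "" == "h") := by
  induction lt with
  | nil => rfl
  | cons e rest ih =>
      simp only [afnLoop1, List.any_cons, ← ih]
      by_cases h : "h" = PySem.List.pyGetD e 2 ""
      · simp [h]
      · have h' : ¬ (PySem.List.pyGetD e 2 "" = "h") := fun hh => h hh.symm
        simp [h, h']

lemma afnCount_eq (lt : List (List String)) (s : String) (c : Int)
    (hno : ∀ t ∈ lt, PySem.List.pyGetD t 2 "" ≠ "h") :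
    lt.foldl
      (fun c e =>
        if s = PySem.List.pyGetD e 0 "" ∧ PySem.List.pyGetD e 2 "" ≠ "h" then c + 1 else c)
      c
    = c + ((lt.map (fun t => PySem.List.pyGetD t 0 "")).count s : Int) := by
  induction lt generalizing c with
  | nil => simp
  | cons e rest ih =>
      have he : PySem.List.pyGetD e 2 "" ≠ "h" := hno e (by simp)
      have hrest : ∀ t ∈ rest, PySem.List.pyGetD t 2 "" ≠ "h" := fun t ht => hno t (by simp [ht])
      simp only [List.foldl_cons, List.map_cons, List.count_cons, ih _ hrest]
      by_cases hs : s = PySem.List.pyGetD e 0 ""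
      · simp [hs, he]; ring
      · have hs' : ¬ (PySem.List.pyGetD e 0 "" = s) := fun hh => hs hh.symm
        simp [hs, he, hs']

lemma counts_getD (lt : List (List String)) (s : String) :
    (lt.foldl
      (fun d t => d.insert (PySem.List.pyGetD t 0 "") (d.getD (PySem.List.pyGetD t 0 "") 0 + 1))
      PySem.Dict.empty).getD s 0
    = ((lt.map (fun t => PySem.List.pyGetD t 0 "")).count s : Int) := by
  have h := PySem.Dict.getD_foldl_insert_add_one
      (l := lt.map (fun t => PySem.List.pyGetD t 0 ""))
      (d := (PySem.Dict.empty : PySem.Dict String Int)) (v := s)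
  rw [List.foldl_map] at h
  simpa using h

lemma afnLoop2_eq_any (lt : List (List String)) (ls : List String)
    (hno : ∀ t ∈ lt, PySem.List.pyGetD t 2 "" ≠ "h") :
    afnLoop2 lt ls 0
    = ls.any (fun s =>
        ((lt.map (fun t => PySem.List.pyGetD t 0 "")).count s : Int) != 2) := by
  induction ls with
  | nil => rfl
  | cons s rest ih =>
      simp only [afnLoop2, afnCount_eq lt s 0 hno, List.any_cons, ← ih]
      by_cases h : ((lt.map (fun t => PySem.List.pyGetD t 0 "")).count s : Int) = 2
      · have h1 : ¬ (0 + ((lt.map (fun t => PySem.List.pyGetD t 0 "")).count s : Int) < 2 ∨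
            0 + ((lt.map (fun t => PySem.List.pyGetD t 0 "")).count s : Int) > 2) := by omega
        simp [h]
      · have h2 : (((lt.map (fun t => PySem.List.pyGetD t 0 "")).count s : Int) != 2) = true := by
          simpa [bne_iff_ne] using h
        by_cases h1 : ((lt.map (fun t => PySem.List.pyGetD t 0 "")).count s : Int) < 2
        · have h3 : (lt.map (fun t => PySem.List.pyGetD t 0 "")).count s ≤ 1 := by omega
          simp [h2, h3]
        · have h3 : 2 < (lt.map (fun t => PySem.List.pyGetD t 0 "")).count s := by omega
          simp [h2, h3]

-- ===== VERDICT (by name: the statement is the Claim_ definition above) =====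
theorem afn_checker_spec : Claim_equal_afn_checker := by
  intro lt ls _ _
  unfold Spec_afn_checker afn_checker afn_checker_alt
  rw [afnLoop1_eq_any]
  by_cases h : lt.any (fun t => PySem.List.pyGetD t 2 "" == "h") = true
  · simp [h]
  · have hno : ∀ t ∈ lt, PySem.List.pyGetD t 2 "" ≠ "h" := by
      intro t ht hEq
      apply h
      simp only [List.any_eq_true]
      exact ⟨t, ht, by simp [hEq]⟩
    simp only [h, if_false, Bool.false_eq_true, afnLoop2_eq_any lt ls hno]
    exact congrArg ls.any (funext fun s =>
      congrArg (fun z : Int => z != 2) (counts_getD lt s).symm)
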